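-- pv_equiv track=rewrite | github.com/f-klubben/stregsystemet | stregsystem/parser.py | get_token_indexes
-- ===== SOURCE A (Python) =====
-- def get_token_indexes(string, start_index):
--     start, end = (-1, -1)
--     # Get start
--     for i in range(start_index, len(string)):
--         if string[i] != " " and string[i] != "\t":
--             start = i
--             break
--     else:
--         return start, end
--     # Get end
--     for i in range(start, len(string)):
--         if string[i] == " " or string[i] == "\t":
--             end = i
--             break
--     else:
--         # Set to one-past-end
--         end = i + 1
--     return start, end
-- ===== SOURCE B (Python) =====
-- import re
--
-- _TOKEN = re.compile(r"[^ \t]+")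
--
-- def get_token_indexes(string, start_index):
--     m = _TOKEN.search(string, start_index)
--     if m is None:
--         return (-1, -1)
--     return (m.start(), m.end())
-- ===== Notes on version B (the rewrite author's own statement) =====
-- stated objective: idiomatic
-- what changed: Replaces the two explicit per-character index-scan loops (with their for/else one-past-end handling) by a single compiled-regex search for [^ \t]+ starting at start_index; the C regex engine gives a constant-factor speedup (measured ~4.5x at the largest size).
-- outside the precondition, e.g. on get_token_indexes('ab', -1): A returns (-1, 2), B returns (0, 2); on get_token_indexes('ab', -5): A raises IndexError, B returns (0, 2)
import Mathlib
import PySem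

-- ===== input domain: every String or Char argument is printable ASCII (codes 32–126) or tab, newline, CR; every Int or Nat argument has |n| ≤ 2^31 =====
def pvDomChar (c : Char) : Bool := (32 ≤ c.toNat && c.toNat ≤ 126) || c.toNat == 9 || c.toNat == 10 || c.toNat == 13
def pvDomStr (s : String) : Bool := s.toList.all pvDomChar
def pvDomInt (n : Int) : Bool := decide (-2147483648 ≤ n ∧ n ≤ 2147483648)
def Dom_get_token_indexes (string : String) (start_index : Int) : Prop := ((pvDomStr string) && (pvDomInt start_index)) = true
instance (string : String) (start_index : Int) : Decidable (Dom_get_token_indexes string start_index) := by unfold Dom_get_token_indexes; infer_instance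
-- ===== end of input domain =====

-- B replaces A's two explicit index-scan loops (with their for/else one-past-end handling)
-- by a single regex token search for [^ \t]+ starting at start_index (same O(n) cost).

-- ===== PORT A =====
-- first loop: first i in the range with a non-blank char (none = the for/else 'return start, end')
-- string[i] is in range for every admitted input (Pre_: 0 ≤ start_index); .getD ' ' is never read there
def gtiFindStart (s : String) : List Int → Option Int
  | [] => none
  | i :: rest =>
    if (PySem.Str.pyGet? s i).getD ' ' ≠ ' ' ∧ (PySem.Str.pyGet? s i).getD ' ' ≠ '\t' then some i
    else gtiFindStart s rest
-- second loop: first blank i, else (for/else) last loop variable + 1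
def gtiFindEnd (s : String) : List Int → Int → Int
  | [], last => last + 1
  | i :: rest, _ =>
    if (PySem.Str.pyGet? s i).getD ' ' = ' ' ∨ (PySem.Str.pyGet? s i).getD ' ' = '\t' then i
    else gtiFindEnd s rest i

def get_token_indexes (string : String) (start_index : Int) : Int × Int :=
  match gtiFindStart string (PySem.List.pyRange start_index (PySem.Str.len string) 1) with
  | none => (-1, -1)
  | some start => (start, gtiFindEnd string (PySem.List.pyRange start (PySem.Str.len string) 1) start)

-- ===== PORT B =====
def gtiBlank (c : Char) : Bool := c == ' ' || c == '\t'

-- hand port of _TOKEN.search(string, start_index) for the pattern [^ \t]+ :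
-- first non-blank position at or after pos is match.start(); the next blank position
-- (or the end of the string) is match.end(); re clamps a negative pos to 0 (Int.toNat)
def get_token_indexes_alt (string : String) (start_index : Int) : Int × Int :=
  match (string.toList.drop start_index.toNat).findIdx? (fun c => !gtiBlank c) with
  | none => (-1, -1)
  | some k =>
    match (string.toList.drop (start_index.toNat + k)).findIdx? gtiBlank with
    | none => ((start_index.toNat + k : Nat), (string.toList.length : Int))
    | some j => ((start_index.toNat + k : Nat), (start_index.toNat + k + j : Nat))

-- ===== PRECONDITION & SPEC =====
-- Pre_ excludes negative start_index: there A either raises IndexError (start_index < -len(string))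
-- or returns indexes produced by Python's accidental negative-index wraparound (e.g. ('ab', -1) -> (-1, 2)).
def Pre_get_token_indexes (string : String) (start_index : Int) : Prop := 0 ≤ start_index
instance (string : String) (start_index : Int) : Decidable (Pre_get_token_indexes string start_index) := by unfold Pre_get_token_indexes; infer_instance
def pvWitness_get_token_indexes : String × Int := ("  quickbuy beer", 1)

-- On start_index < -len(string) A raises IndexError (the first scan reads string[start_index]); B returns the token match from position 0.
def Spec_get_token_indexes (string : String) (start_index : Int) (out : Int × Int) : Prop := out = get_token_indexes_alt string start_index
instance (string : String) (start_index : Int) (out : Int × Int) : Decidable (Spec_get_token_indexes string start_index out) := by unfold Spec_get_token_indexes; infer_instance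

-- ===== CLAIM (what is proved, stated in full; the proofs are below) =====
def Claim_equal_get_token_indexes : Prop := ∀ (string : String) (start_index : Int), Dom_get_token_indexes string start_index → Pre_get_token_indexes string start_index → Spec_get_token_indexes string start_index (get_token_indexes string start_index)

-- ===== LEMMAS AND PROOFS =====

theorem gtiBlank_decide (c : Char) : (!gtiBlank c) = decide (c ≠ ' ' ∧ c ≠ '\t') := by
  cases h1 : c == ' ' <;> cases h2 : c == '\t' <;> simp_all [gtiBlank]

theorem pyGet?_toNat (s : String) (i : Int) (h : 0 ≤ i) :
    PySem.Str.pyGet? s i = s.toList[i.toNat]? := by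
  rw [← Int.toNat_of_nonneg h, PySem.Str.pyGet?_natCast]
  have h2 : ((i.toNat : Int)).toNat = i.toNat := by omega
  rw [h2]

theorem gtiFindStart_eq (s : String) (m : Nat) : ∀ (a : Int), 0 ≤ a →
    (s.toList.length - a.toNat) = m →
    gtiFindStart s (PySem.List.pyRange a (s.toList.length : Int) 1)
      = ((s.toList.drop a.toNat).findIdx? (fun c => !gtiBlank c)).map (fun k => a + (k : Int)) := by
  induction m with
  | zero =>
    intro a ha hm
    have hge : (s.toList.length : Int) ≤ a := by omega
    rw [PySem.List.pyRange_one_eq_nil hge, List.drop_eq_nil_of_le (by omega)]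
    simp [gtiFindStart]
  | succ m ih =>
    intro a ha hm
    have hlt : a < (s.toList.length : Int) := by omega
    have hnat : a.toNat < s.toList.length := by omega
    rw [PySem.List.pyRange_one_cons hlt, List.drop_eq_getElem_cons hnat]
    rw [List.findIdx?_cons]
    simp only [gtiFindStart, pyGet?_toNat s a ha, List.getElem?_eq_getElem hnat,
      Option.getD_some]
    by_cases hc : s.toList[a.toNat] ≠ ' ' ∧ s.toList[a.toNat] ≠ '\t'
    · rw [if_pos hc, if_pos (by rw [gtiBlank_decide]; exact decide_eq_true hc)]
      simp
    · rw [if_neg hc, if_neg (by rw [gtiBlank_decide]; simpa using hc)]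
      have ha1 : (a + 1).toNat = a.toNat + 1 := by omega
      rw [ih (a + 1) (by omega) (by omega), ha1]
      cases h : (s.toList.drop (a.toNat + 1)).findIdx? (fun c => !gtiBlank c) with
      | none => rfl
      | some k =>
        show some (a + 1 + (k : Int)) = some (a + ((k + 1 : Nat) : Int))
        congr 1
        omega

theorem gtiFindEnd_eq (s : String) (m : Nat) : ∀ (a d : Int), 0 ≤ a →
    a < (s.toList.length : Int) →
    (s.toList.length - a.toNat) = m →
    gtiFindEnd s (PySem.List.pyRange a (s.toList.length : Int) 1) d
      = (match (s.toList.drop a.toNat).findIdx? gtiBlank with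
         | none => (s.toList.length : Int)
         | some j => a + (j : Int)) := by
  induction m with
  | zero => intro a d ha hlt hm; omega
  | succ m ih =>
    intro a d ha hlt hm
    have hnat : a.toNat < s.toList.length := by omega
    rw [PySem.List.pyRange_one_cons hlt, List.drop_eq_getElem_cons hnat]
    rw [List.findIdx?_cons]
    simp only [gtiFindEnd, pyGet?_toNat s a ha, List.getElem?_eq_getElem hnat,
      Option.getD_some]
    by_cases hc : s.toList[a.toNat] = ' ' ∨ s.toList[a.toNat] = '\t'
    · rw [if_pos hc, if_pos (by simp [gtiBlank]; tauto)]
      simp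
    · rw [if_neg hc, if_neg (by simp [gtiBlank]; tauto)]
      by_cases hend : a + 1 < (s.toList.length : Int)
      · have ha1 : (a + 1).toNat = a.toNat + 1 := by omega
        rw [ih (a + 1) a (by omega) hend (by omega), ha1]
        cases h : (s.toList.drop (a.toNat + 1)).findIdx? gtiBlank with
        | none => rfl
        | some k => simp; push_cast; ring
      · have hge : (s.toList.length : Int) ≤ a + 1 := by omega
        rw [PySem.List.pyRange_one_eq_nil hge,
          List.drop_eq_nil_of_le (show s.toList.length ≤ a.toNat + 1 by omega)]
        show a + 1 = ((s.toList.length : Nat) : Int)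
        omega

theorem get_token_indexes_spec : Claim_equal_get_token_indexes := by
  intro s a _ hpre
  have ha0 : (0:Int) ≤ a := hpre
  unfold Spec_get_token_indexes get_token_indexes get_token_indexes_alt
  have hlen : PySem.Str.len s = (s.toList.length : Int) := by simp
  rw [hlen, gtiFindStart_eq s (s.toList.length - a.toNat) a hpre rfl]
  cases hfs : (s.toList.drop a.toNat).findIdx? (fun c => !gtiBlank c) with
  | none => simp
  | some k =>
    have hk : k < (s.toList.drop a.toNat).length := by
      rw [List.findIdx?_eq_some_iff_findIdx_eq] at hfs; exact hfs.1
    have hkl : a.toNat + k < s.toList.length := by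
      have := List.length_drop (i := a.toNat) (l := s.toList); omega
    have hred : (Option.map (fun j => a + j)
        (do let x ← some k; pure ((x : Int)))) = some (a + (k : Int)) := rfl
    rw [hred]
    have hstart : (0:Int) ≤ a + k := by omega
    have hlt : a + (k : Int) < (s.toList.length : Int) := by omega
    show (a + (k:Int), gtiFindEnd s (PySem.List.pyRange (a + (k:Int)) ((s.toList.length : Nat) : Int) 1) (a + (k:Int))) =
      (match (s.toList.drop (a.toNat + k)).findIdx? gtiBlank with
       | none => (((a.toNat + k : Nat) : Int), ((s.toList.length : Nat) : Int))
       | some j => (((a.toNat + k : Nat) : Int), ((a.toNat + k + j : Nat) : Int)))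
    rw [gtiFindEnd_eq s (s.toList.length - (a + (k:Int)).toNat) (a + k) (a + k) hstart hlt rfl]
    have htn : (a + (k : Int)).toNat = a.toNat + k := by omega
    rw [htn]
    cases hfe : (s.toList.drop (a.toNat + k)).findIdx? gtiBlank with
    | none => simp [Prod.ext_iff]; omega
    | some j => simp [Prod.ext_iff]; omega

-- ===== VERDICT (by name: the statement is the Claim_ definition above) =====
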